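-- pv_equiv track=rewrite | github.com/Sakethv7/Leetcode-Problems | 1652-minimum-suffix-flips/minimum-suffix-flips.py | minFlips
-- ===== SOURCE A (Python) =====
-- def minFlips(target: str) -> int:
--     flips = 0
--     prev = '0' # as the characters are string
--
--     for char in target:
--         if char != prev:
--             flips += 1
--             prev = char
--
--     return flips
-- ===== SOURCE B (Python) =====
-- def minFlips(target: str) -> int:
--     # Divide and conquer: mismatches(lo,hi) = count of adjacent differing pairs
--     # inside target[lo:hi], computed by splitting at the midpoint and adding
--     # the single cross-boundary comparison.
--     def mismatches(lo: int, hi: int) -> int: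
--         if hi - lo < 2:
--             return 0
--         mid = (lo + hi) // 2
--         return mismatches(lo, mid) + mismatches(mid, hi) + (1 if target[mid - 1] != target[mid] else 0)
--
--     return mismatches(0, len(target)) + (1 if target and target[0] != '0' else 0)
-- ===== Notes on version B (the rewrite author's own statement) =====
-- stated objective: alternative
-- what changed: B counts adjacent mismatching pairs by divide-and-conquer (recursively splitting the string at its midpoint and adding one cross-boundary comparison), then adds 1 if the first character is not '0'; A instead makes a single left-to-right pass with a running prev accumulator.
import Mathlib
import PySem

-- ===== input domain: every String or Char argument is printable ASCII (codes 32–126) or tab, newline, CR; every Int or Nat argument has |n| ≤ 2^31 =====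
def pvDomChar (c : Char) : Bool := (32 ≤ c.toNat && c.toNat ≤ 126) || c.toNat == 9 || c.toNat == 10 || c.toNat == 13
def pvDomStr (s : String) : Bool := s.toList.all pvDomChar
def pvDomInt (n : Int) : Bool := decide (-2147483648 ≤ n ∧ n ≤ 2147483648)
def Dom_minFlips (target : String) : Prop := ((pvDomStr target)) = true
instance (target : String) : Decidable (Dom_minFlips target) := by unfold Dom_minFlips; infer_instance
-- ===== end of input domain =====

-- B counts adjacent mismatches by divide-and-conquer (midpoint split + one boundary comparison)
-- plus a first-character check; A makes one left-to-right pass with a prev accumulator. Same O(n) cost.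

-- ===== PORT A =====
def pvStepA (st : Int × Char) (char : Char) : Int × Char :=
  if char ≠ st.2 then (st.1 + 1, char) else st

def minFlips (target : String) : Int :=
  (target.toList.foldl pvStepA (0, '0')).1

-- ===== PORT B =====
-- mismatches(lo,hi) of Source B, carried as the sublist target[lo:hi]; the two indexed
-- accesses target[mid-1], target[mid] are always in range, so getElem? is exact here.
def pvDCTrans (l : List Char) : Int :=
  if l.length < 2 then 0
  else
    pvDCTrans (l.take (l.length / 2)) + pvDCTrans (l.drop (l.length / 2)) +
      (if l[l.length / 2 - 1]? ≠ l[l.length / 2]? then 1 else 0)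
termination_by l.length
decreasing_by
  · simp only [List.length_take]; omega
  · simp only [List.length_drop]; omega

def minFlips_alt (target : String) : Int :=
  pvDCTrans target.toList +
    (match target.toList with
     | [] => 0
     | c :: _ => if c ≠ '0' then 1 else 0)

-- ===== PRECONDITION & SPEC =====
def Spec_minFlips (target : String) (out : Int) : Prop := out = minFlips_alt target
instance (target : String) (out : Int) : Decidable (Spec_minFlips target out) := by unfold Spec_minFlips; infer_instance

-- ===== CLAIM (what is proved, stated in full; the proofs are below) =====
def Claim_equal_minFlips : Prop := ∀ (target : String), Dom_minFlips target → Spec_minFlips target (minFlips target)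

-- ===== LEMMAS AND PROOFS =====
-- count of adjacent mismatching pairs, structurally
def pvPair : List Char → Int
  | [] => 0
  | [_] => 0
  | a :: b :: rest => (if a ≠ b then 1 else 0) + pvPair (b :: rest)

def pvBound : Option Char → Option Char → Int
  | some x, some y => if x ≠ y then 1 else 0
  | _, _ => 0

theorem pvPair_append (l1 l2 : List Char) :
    pvPair (l1 ++ l2) = pvPair l1 + pvPair l2 + pvBound l1.getLast? l2.head? := by
  induction l1 with
  | nil => simp [pvPair, pvBound]
  | cons a t ih =>
    cases t with
    | nil =>
      cases l2 with
      | nil => simp [pvPair, pvBound]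
      | cons b t2 => simp [pvPair, pvBound]; ring
    | cons b t' =>
      have : ((a :: b :: t') ++ l2) = a :: ((b :: t') ++ l2) := rfl
      rw [this]
      show (if a ≠ b then (1:Int) else 0) + pvPair ((b :: t') ++ l2) = _
      rw [ih]
      have hlast : (a :: b :: t').getLast? = (b :: t').getLast? := by
        simp [List.getLast?_cons_cons]
      rw [hlast]
      show _ = (if a ≠ b then (1:Int) else 0) + pvPair (b :: t') + pvPair l2 + _
      ring

theorem pvDC_eq_pair (n : Nat) : ∀ l : List Char, l.length = n → pvDCTrans l = pvPair l := by
  induction n using Nat.strong_induction_on with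
  | _ n ih =>
    intro l hl
    rw [pvDCTrans]
    by_cases hsmall : l.length < 2
    · rw [if_pos hsmall]
      match l, hsmall with
      | [], _ => simp [pvPair]
      | [a], _ => simp [pvPair]
    · rw [if_neg hsmall]
      have h2 : 2 ≤ l.length := by omega
      have hmid1 : 1 ≤ l.length / 2 := by omega
      have hmidlt : l.length / 2 < l.length := by omega
      rw [ih (l.take (l.length / 2)).length (by simp [List.length_take]; omega) _ rfl,
          ih (l.drop (l.length / 2)).length (by simp [List.length_drop]; omega) _ rfl]
      conv_rhs => rw [← List.take_append_drop (l.length / 2) l]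
      rw [pvPair_append]
      have hlast : (l.take (l.length / 2)).getLast? = l[l.length / 2 - 1]? := by
        rw [List.getLast?_eq_getElem?, List.getElem?_take, List.length_take]
        have : min (l.length / 2) l.length = l.length / 2 := by omega
        rw [this, if_pos (by omega)]
      have hhead : (l.drop (l.length / 2)).head? = l[l.length / 2]? := by
        rw [List.head?_drop]
      rw [hlast, hhead]
      obtain ⟨a, ha⟩ : ∃ a, l[l.length / 2 - 1]? = some a :=
        ⟨l[l.length / 2 - 1], List.getElem?_eq_getElem (by omega)⟩
      obtain ⟨b, hb⟩ : ∃ b, l[l.length / 2]? = some b :=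
        ⟨l[l.length / 2], List.getElem?_eq_getElem (by omega)⟩
      rw [ha, hb]
      simp [pvBound]

-- A's loop as a structural recursion
def pvTrans : Char → List Char → Int
  | _, [] => 0
  | p, c :: rest => if c = p then pvTrans p rest else 1 + pvTrans c rest

theorem pvFoldl_trans (l : List Char) (f : Int) (p : Char) :
    (l.foldl pvStepA (f, p)).1 = f + pvTrans p l := by
  induction l generalizing f p with
  | nil => simp [pvTrans]
  | cons c rest ih =>
    rw [List.foldl_cons]
    by_cases h : c = p
    · simp [pvStepA, h, pvTrans, ih]
    · simp only [pvStepA, h, ne_eq, not_false_iff, if_pos, ih, pvTrans, if_neg]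
      ring

theorem pvTrans_pair (l : List Char) (p : Char) :
    pvTrans p l = pvPair l + (match l with | [] => 0 | c :: _ => if c ≠ p then 1 else 0) := by
  induction l generalizing p with
  | nil => simp [pvTrans, pvPair]
  | cons c rest ih =>
    have hc : pvTrans p (c :: rest) = (if c = p then (0:Int) else 1) + pvTrans c rest := by
      by_cases h : c = p
      · simp [pvTrans, h]
      · simp [pvTrans, h]
    rw [hc, ih c]
    cases rest with
    | nil => simp [pvPair]
    | cons b t =>
      show (if c = p then (0:Int) else 1) + (pvPair (b :: t) + (if b ≠ c then 1 else 0))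
          = ((if c ≠ b then (1:Int) else 0) + pvPair (b :: t)) + (if c ≠ p then 1 else 0)
      have h1 : (if c = p then (0:Int) else 1) = (if c ≠ p then 1 else 0) := by
        by_cases h : c = p <;> simp [h]
      have h2 : (if b ≠ c then (1:Int) else 0) = (if c ≠ b then 1 else 0) := by
        by_cases hb : b = c
        · simp [hb]
        · have hcb : ¬c = b := fun he => hb he.symm
          simp [hb, hcb]
      rw [h1, h2]; ring

-- ===== VERDICT (by name: the statement is the Claim_ definition above) =====
theorem minFlips_spec : Claim_equal_minFlips := by
  intro target _
  unfold Spec_minFlips minFlips minFlips_alt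
  rw [pvFoldl_trans, pvTrans_pair, pvDC_eq_pair target.toList.length _ rfl]
  cases target.toList with
  | nil => simp
  | cons c rest => ring
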